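-- pv_equiv track=rewrite | github.com/Estuardo07/Lab_C | mylib.py | remove_after_ws
-- ===== SOURCE A (Python) =====
-- def remove_after_ws(texto):
--     encontrado_id = False
--     nueva_cadena = ""
--     for c in texto:
--         if c == "i":
--             encontrado_id = True
--         elif encontrado_id and c == "d":
--             nueva_cadena = nueva_cadena + "ws"
--             break
--         else:
--             nueva_cadena = nueva_cadena + c
--     return nueva_cadena
-- ===== SOURCE B (Python) =====
-- def remove_after_ws(texto):
--     i = texto.find('i')
--     if i == -1:
--         return texto
--     d = texto.find('d', i + 1)
--     if d == -1:
--         return texto.replace('i', '')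
--     return texto[:d].replace('i', '') + 'ws'
-- ===== Notes on version B (the rewrite author's own statement) =====
-- stated objective: faster
-- what changed: Replaces the stateful char-by-char flag loop with quadratic string concatenation by index arithmetic: find() locates the first 'i' and the first 'd' after it, and a slice plus replace('i','') bulk-builds the result in linear time.
import Mathlib
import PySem

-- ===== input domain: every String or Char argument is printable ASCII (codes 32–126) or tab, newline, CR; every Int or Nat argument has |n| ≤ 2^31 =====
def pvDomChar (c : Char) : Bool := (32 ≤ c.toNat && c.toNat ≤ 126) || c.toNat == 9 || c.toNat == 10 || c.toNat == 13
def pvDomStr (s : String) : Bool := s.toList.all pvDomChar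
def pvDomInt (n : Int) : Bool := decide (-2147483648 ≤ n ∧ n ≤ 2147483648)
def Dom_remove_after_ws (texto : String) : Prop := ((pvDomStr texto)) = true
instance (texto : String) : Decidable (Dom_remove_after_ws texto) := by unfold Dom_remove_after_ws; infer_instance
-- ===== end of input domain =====

-- B replaces A's stateful flag loop (quadratic concatenation) by find/slice/replace index arithmetic (objective: faster, measured).

-- ===== PORT A =====
-- A's loop: state = (encontrado_id, nueva_cadena); 'break' = returning the accumulator.
def removeAfterWsLoopA : List Char → Bool → List Char → List Char
  | [], _, acc => acc
  | c :: rest, flag, acc =>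
    if c = 'i' then removeAfterWsLoopA rest true acc
    else if flag && c = 'd' then acc ++ ['w', 's']
    else removeAfterWsLoopA rest flag (acc ++ [c])

def remove_after_ws (texto : String) : String :=
  String.ofList (removeAfterWsLoopA texto.toList false [])

-- ===== PORT B =====
-- B's find('i') → idxOf? on the char list; find('d', i+1) → idxOf? on the dropped suffix
-- (exact for single-char needles); texto[:d] → take; replace('i','') → filter (exact: the
-- replacement is empty, so replace is exactly removal of each 'i').
def removeAfterWsAltGo (cs : List Char) : List Char :=
  match cs.idxOf? 'i' with
  | none => cs
  | some i =>
    match (cs.drop (i + 1)).idxOf? 'd' with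
    | none => cs.filter (· ≠ 'i')
    | some j => (cs.take (i + 1 + j)).filter (· ≠ 'i') ++ ['w', 's']

def remove_after_ws_alt (texto : String) : String :=
  String.ofList (removeAfterWsAltGo texto.toList)

-- ===== PRECONDITION & SPEC =====
def Spec_remove_after_ws (texto : String) (out : String) : Prop := out = remove_after_ws_alt texto
instance (texto : String) (out : String) : Decidable (Spec_remove_after_ws texto out) := by unfold Spec_remove_after_ws; infer_instance

-- ===== CLAIM (what is proved, stated in full; the proofs are below) =====
def Claim_equal_remove_after_ws : Prop := ∀ (texto : String), Dom_remove_after_ws texto → Spec_remove_after_ws texto (remove_after_ws texto)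

-- ===== LEMMAS AND PROOFS =====

theorem loopA_acc (cs : List Char) (flag : Bool) (acc : List Char) :
    removeAfterWsLoopA cs flag acc = acc ++ removeAfterWsLoopA cs flag [] := by
  induction cs generalizing flag acc with
  | nil => simp [removeAfterWsLoopA]
  | cons c rest ih =>
    simp only [removeAfterWsLoopA]
    split_ifs with h1 h2
    · exact ih true acc
    · simp
    · rw [ih flag (acc ++ [c]), List.nil_append, ih flag [c]]
      simp

theorem loopA_true (cs : List Char) :
    removeAfterWsLoopA cs true [] =
      match cs.idxOf? 'd' with
      | none => cs.filter (· ≠ 'i')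
      | some j => (cs.take j).filter (· ≠ 'i') ++ ['w', 's'] := by
  induction cs with
  | nil => simp [removeAfterWsLoopA]
  | cons c rest ih =>
    by_cases hd : c = 'd'
    · subst hd
      simp [removeAfterWsLoopA, List.idxOf?_cons]
    · by_cases hi : c = 'i'
      · subst hi
        simp only [removeAfterWsLoopA, ih]
        simp [List.idxOf?_cons]
        cases h : rest.idxOf? 'd' <;> simp
      · simp only [removeAfterWsLoopA, if_neg hi, Bool.true_and]
        rw [loopA_acc, ih]
        simp [List.idxOf?_cons]
        cases h : rest.idxOf? 'd' <;> simp [hi, hd]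

theorem loopA_false (cs : List Char) :
    removeAfterWsLoopA cs false [] = removeAfterWsAltGo cs := by
  induction cs with
  | nil => simp [removeAfterWsLoopA, removeAfterWsAltGo]
  | cons c rest ih =>
    by_cases hi : c = 'i'
    · subst hi
      simp only [removeAfterWsLoopA]
      rw [loopA_true]
      simp [removeAfterWsAltGo, List.idxOf?_cons]
      cases h : rest.idxOf? 'd' with
      | none => simp
      | some j => simp [Nat.add_comm 1 j, List.take_succ_cons]
    · simp only [removeAfterWsLoopA]
      rw [if_neg hi, if_neg (by simp : ¬(false && decide (c = 'd')) = true)]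
      rw [loopA_acc, ih]
      simp only [removeAfterWsAltGo, List.idxOf?_cons]
      cases h : rest.idxOf? 'i' with
      | none => simp [beq_iff_eq, hi]
      | some i =>
        simp only [beq_iff_eq, hi, if_false, Option.map_some]
        cases h2 : (rest.drop (i + 1)).idxOf? 'd' with
        | none => simp [List.drop_succ_cons, h2, hi]
        | some j =>
          simp only [List.drop_succ_cons, h2]
          rw [show i + 1 + 1 + j = (i + 1 + j) + 1 by omega, List.take_succ_cons]
          simp [hi]

-- ===== VERDICT (by name: the statement is the Claim_ definition above) =====
theorem remove_after_ws_spec : Claim_equal_remove_after_ws := by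
  intro texto _
  unfold Spec_remove_after_ws remove_after_ws remove_after_ws_alt
  rw [loopA_false]
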